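-- pv_equiv track=rewrite | github.com/h1r9do/Network-Dashboard | test/collect_comprehensive_inventory.py | _parse_nexus_fex_detail
-- ===== SOURCE A (Python) =====
-- def _parse_nexus_fex_detail(output, hostname):
--     """Parse detailed Nexus FEX information"""
--     fex_details = []
--
--     current_fex = None
--     for line in output.split('\n'):
--         if line.startswith('FEX:'):
--             if current_fex:
--                 fex_details.append(current_fex)
--
--             fex_num = line.split()[1]
--             current_fex = {
--                 'fex_number': fex_num,
--                 'parent_hostname': hostname
--             }
--         elif current_fex:
--             if 'Description:' in line:
--                 current_fex['description'] = line.split('Description:')[-1].strip()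
--             elif 'state:' in line:
--                 current_fex['state'] = line.split('state:')[-1].strip()
--             elif 'Model:' in line:
--                 current_fex['model'] = line.split('Model:')[-1].strip()
--             elif 'Serial number:' in line:
--                 current_fex['serial_number'] = line.split('Serial number:')[-1].strip()
--             elif 'Extender Serial:' in line:
--                 current_fex['extender_serial'] = line.split('Extender Serial:')[-1].strip()
--
--     if current_fex:
--         fex_details.append(current_fex)
--
--     return {'fex_modules': fex_details}
-- ===== SOURCE B (Python) =====
-- def _parse_nexus_fex_detail(output, hostname):
--     """Parse detailed Nexus FEX information (two-phase: block split, then per-block field scan)"""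
--     lines = output.split('\n')
--     # Phase 1: split into blocks, one per 'FEX:' header; preamble lines are dropped.
--     blocks = []
--     for line in lines:
--         if line.startswith('FEX:'):
--             blocks.append([line])
--         elif blocks:
--             blocks[-1].append(line)
--     # Phase 2: map each block to its dict.
--     fields = [('Description:', 'description'),
--               ('state:', 'state'),
--               ('Model:', 'model'),
--               ('Serial number:', 'serial_number'),
--               ('Extender Serial:', 'extender_serial')]
--     fex_modules = []
--     for block in blocks:
--         fex = {'fex_number': block[0].split()[1], 'parent_hostname': hostname}
--         for line in block[1:]:
--             for marker, key in fields:
--                 if marker in line: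
--                     fex[key] = line.split(marker)[-1].strip()
--                     break
--         fex_modules.append(fex)
--     return {'fex_modules': fex_modules}
-- ===== Notes on version B (the rewrite author's own statement) =====
-- stated objective: alternative
-- what changed: Replaced A's single interleaved loop carrying (fex_details, current_fex) state by a two-phase decomposition: first split the lines into per-FEX blocks (dropping preamble), then map each block to its dict with a table-driven first-matching-field scan replacing the elif chain.
import Mathlib
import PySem

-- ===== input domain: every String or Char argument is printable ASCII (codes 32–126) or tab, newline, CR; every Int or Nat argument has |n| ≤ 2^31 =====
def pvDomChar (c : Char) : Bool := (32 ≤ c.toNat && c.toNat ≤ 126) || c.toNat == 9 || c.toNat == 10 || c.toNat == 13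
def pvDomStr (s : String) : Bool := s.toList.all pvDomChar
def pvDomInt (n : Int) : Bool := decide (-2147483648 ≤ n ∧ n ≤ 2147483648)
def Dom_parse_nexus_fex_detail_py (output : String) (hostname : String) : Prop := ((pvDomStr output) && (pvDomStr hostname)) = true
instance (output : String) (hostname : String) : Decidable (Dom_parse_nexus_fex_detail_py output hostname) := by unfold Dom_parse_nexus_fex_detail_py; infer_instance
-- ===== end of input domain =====

-- B re-decomposes A's single interleaved loop into two phases (split lines into FEX blocks, then map
-- each block to a dict via a table-driven field scan); same return value, objective: alternative.

-- ===== PORT A =====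
-- line.split(sep)[-1]  (sep ≠ "", so the split list is nonempty and the default never fires)
def pvLastSplit (line sep : String) : String :=
  (PySem.List.pyGet? ((PySem.Str.split? line sep).getD []) (-1)).getD ""

-- one iteration of A's loop; state = (fex_details so far as items lists, current_fex).
-- line.split()[1] is pyGet?; the .getD "" default only fires where Python A raises IndexError (outside Pre_).
def pvFexStepA (hostname : String)
    (st : List (List (String × String)) × Option (PySem.Dict String String)) (line : String) :
    List (List (String × String)) × Option (PySem.Dict String String) :=
  if PySem.Str.startswith line "FEX:" then
    let acc := match st.2 with
      | some d => st.1 ++ [d.items]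
      | none => st.1
    let fexNum := (PySem.List.pyGet? (PySem.Str.split₀ line) 1).getD ""
    (acc, some (((PySem.Dict.empty).insert "fex_number" fexNum).insert "parent_hostname" hostname))
  else
    match st.2 with
    | none => st
    | some d =>
      if PySem.Str.isIn "Description:" line then
        (st.1, some (d.insert "description" (PySem.Str.strip (pvLastSplit line "Description:"))))
      else if PySem.Str.isIn "state:" line then
        (st.1, some (d.insert "state" (PySem.Str.strip (pvLastSplit line "state:"))))
      else if PySem.Str.isIn "Model:" line then
        (st.1, some (d.insert "model" (PySem.Str.strip (pvLastSplit line "Model:"))))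
      else if PySem.Str.isIn "Serial number:" line then
        (st.1, some (d.insert "serial_number" (PySem.Str.strip (pvLastSplit line "Serial number:"))))
      else if PySem.Str.isIn "Extender Serial:" line then
        (st.1, some (d.insert "extender_serial" (PySem.Str.strip (pvLastSplit line "Extender Serial:"))))
      else st

def parse_nexus_fex_detail_py (output : String) (hostname : String) :
    List (String × List (List (String × String))) :=
  let st := ((PySem.Str.split? output "\n").getD []).foldl (pvFexStepA hostname) ([], none)
  let fex_details := match st.2 with
    | some d => st.1 ++ [d.items]
    | none => st.1
  [("fex_modules", fex_details)]

-- ===== PORT B =====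
-- phase 1: 'FEX:' header starts a new block, other lines are appended to the last block (preamble dropped)
def pvBlockStep (blocks : List (List String)) (line : String) : List (List String) :=
  if PySem.Str.startswith line "FEX:" then blocks ++ [[line]]
  else match blocks.getLast? with
    | none => blocks
    | some b => blocks.dropLast ++ [b ++ [line]]

def pvFields : List (String × String) :=
  [("Description:", "description"), ("state:", "state"), ("Model:", "model"),
   ("Serial number:", "serial_number"), ("Extender Serial:", "extender_serial")]

-- inner 'for marker, key in fields: if marker in line: …; break' = find first matching field
def pvFieldStep (d : PySem.Dict String String) (line : String) : PySem.Dict String String :=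
  match pvFields.find? (fun p => PySem.Str.isIn p.1 line) with
  | some p => d.insert p.2 (PySem.Str.strip (pvLastSplit line p.1))
  | none => d

-- phase 2: a block to its dict; block[0] is headD "" (blocks are never empty)
def pvMkFexDict (hostname : String) (block : List String) : PySem.Dict String String :=
  let fexNum := (PySem.List.pyGet? (PySem.Str.split₀ (block.headD "")) 1).getD ""
  block.tail.foldl pvFieldStep
    (((PySem.Dict.empty).insert "fex_number" fexNum).insert "parent_hostname" hostname)

def pvMkFex (hostname : String) (block : List String) : List (String × String) :=
  (pvMkFexDict hostname block).items

def parse_nexus_fex_detail_py_alt (output : String) (hostname : String) :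
    List (String × List (List (String × String))) :=
  let blocks := ((PySem.Str.split? output "\n").getD []).foldl pvBlockStep []
  [("fex_modules", blocks.map (pvMkFex hostname))]

-- ===== PRECONDITION & SPEC =====
-- Pre_ excludes exactly the inputs where Python A raises IndexError: a line starting with 'FEX:'
-- whose whitespace split has fewer than 2 tokens (line.split()[1]); B raises there too.
def Pre_parse_nexus_fex_detail_py (output : String) (hostname : String) : Prop :=
  (((PySem.Str.split? output "\n").getD []).all
    (fun line => !(PySem.Str.startswith line "FEX:") || decide (2 ≤ (PySem.Str.split₀ line).length))) = true
instance (output : String) (hostname : String) : Decidable (Pre_parse_nexus_fex_detail_py output hostname) := by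
  unfold Pre_parse_nexus_fex_detail_py; infer_instance

def pvWitness_parse_nexus_fex_detail_py : String × String :=
  ("FEX: 101\n  Description: rack7\n  state: Online", "sw1")

def Spec_parse_nexus_fex_detail_py (output : String) (hostname : String)
    (out : List (String × List (List (String × String)))) : Prop :=
  out = parse_nexus_fex_detail_py_alt output hostname
instance (output : String) (hostname : String) (out : List (String × List (List (String × String)))) :
    Decidable (Spec_parse_nexus_fex_detail_py output hostname out) := by
  unfold Spec_parse_nexus_fex_detail_py; infer_instance

-- ===== CLAIM (what is proved, stated in full; the proofs are below) =====
def Claim_equal_parse_nexus_fex_detail_py : Prop :=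
  ∀ (output : String) (hostname : String), Dom_parse_nexus_fex_detail_py output hostname →
    Pre_parse_nexus_fex_detail_py output hostname →
    Spec_parse_nexus_fex_detail_py output hostname (parse_nexus_fex_detail_py output hostname)

-- ===== LEMMAS AND PROOFS =====

-- abstraction: B's block list determines A's loop state
def pvAbs (hostname : String) (bs : List (List String)) :
    List (List (String × String)) × Option (PySem.Dict String String) :=
  (bs.getLast?).elim ([], none)
    (fun b => (bs.dropLast.map (pvMkFex hostname), some (pvMkFexDict hostname b)))

theorem pv_dropLast_append_getLast {α : Type} {bs : List α} {b : α}
    (h : bs.getLast? = some b) : bs.dropLast ++ [b] = bs := by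
  have hbs : bs ≠ [] := by rintro rfl; simp at h
  have hb : b = bs.getLast hbs := by
    rw [List.getLast?_eq_some_getLast hbs] at h; exact (Option.some.inj h).symm
  subst hb; exact List.dropLast_append_getLast hbs

-- A's elif chain on a current dict = B's table-driven find-first step
theorem pvFieldStep_eq (d : PySem.Dict String String) (line : String) :
    pvFieldStep d line =
      (if PySem.Str.isIn "Description:" line then
        d.insert "description" (PySem.Str.strip (pvLastSplit line "Description:"))
      else if PySem.Str.isIn "state:" line then
        d.insert "state" (PySem.Str.strip (pvLastSplit line "state:"))
      else if PySem.Str.isIn "Model:" line then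
        d.insert "model" (PySem.Str.strip (pvLastSplit line "Model:"))
      else if PySem.Str.isIn "Serial number:" line then
        d.insert "serial_number" (PySem.Str.strip (pvLastSplit line "Serial number:"))
      else if PySem.Str.isIn "Extender Serial:" line then
        d.insert "extender_serial" (PySem.Str.strip (pvLastSplit line "Extender Serial:"))
      else d) := by
  unfold pvFieldStep pvFields
  simp only [List.find?]
  split_ifs <;> simp_all

-- A's step on a non-header line with a current dict is B's field step
theorem pvStepA_nonheader (hostname line : String) (acc : List (List (String × String)))
    (d : PySem.Dict String String) (hsw : ¬ PySem.Str.startswith line "FEX:" = true) :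
    pvFexStepA hostname (acc, some d) line = (acc, some (pvFieldStep d line)) := by
  unfold pvFexStepA
  rw [if_neg hsw, pvFieldStep_eq]
  split_ifs <;> rfl

-- one step commutes with the abstraction
theorem pvStep_comm (hostname : String) (bs : List (List String)) (line : String)
    (hne : ∀ b ∈ bs, b ≠ []) :
    pvFexStepA hostname (pvAbs hostname bs) line = pvAbs hostname (pvBlockStep bs line) := by
  by_cases hsw : PySem.Str.startswith line "FEX:" = true
  · cases hlast : bs.getLast? with
    | none =>
      have hbs : bs = [] := by cases bs <;> simp_all
      subst hbs
      unfold pvFexStepA pvBlockStep pvAbs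
      rw [if_pos hsw, if_pos hsw]
      rfl
    | some b =>
      have hbs := pv_dropLast_append_getLast hlast
      have hmap : bs.map (pvMkFex hostname)
          = bs.dropLast.map (pvMkFex hostname) ++ [pvMkFex hostname b] := by
        conv_lhs => rw [← hbs]
        simp
      unfold pvFexStepA pvBlockStep pvAbs
      rw [hlast, if_pos hsw, if_pos hsw]
      simp only [Option.elim]
      rw [show (bs ++ [[line]]).getLast? = some [line] from by simp]
      simp only [List.dropLast_concat]
      rw [hmap]
      rfl
  · cases hlast : bs.getLast? with
    | none =>
      have hbs : bs = [] := by cases bs <;> simp_all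
      subst hbs
      unfold pvFexStepA pvBlockStep pvAbs
      rw [if_neg hsw, if_neg hsw]
      rfl
    | some b =>
      have hb : b ≠ [] := hne b (List.mem_of_getLast? hlast)
      have hdict : pvMkFexDict hostname (b ++ [line])
          = pvFieldStep (pvMkFexDict hostname b) line := by
        unfold pvMkFexDict
        cases b with
        | nil => exact absurd rfl hb
        | cons x t => simp [List.foldl_append]
      unfold pvAbs pvBlockStep
      rw [hlast, if_neg hsw]
      simp only [Option.elim]
      rw [pvStepA_nonheader hostname line _ _ hsw]
      rw [show (bs.dropLast ++ [b ++ [line]]).getLast? = some (b ++ [line]) from by simp]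
      simp only [List.dropLast_concat, hdict]

theorem pvBlockStep_ne (bs : List (List String)) (line : String)
    (hne : ∀ b ∈ bs, b ≠ []) : ∀ b ∈ pvBlockStep bs line, b ≠ [] := by
  intro b hb
  unfold pvBlockStep at hb
  split at hb
  · rcases List.mem_append.1 hb with h | h
    · exact hne b h
    · simp at h; subst h; simp
  · cases hlast : bs.getLast? with
    | none => simp [hlast] at hb; exact hne b hb
    | some c =>
      simp only [hlast] at hb
      rcases List.mem_append.1 hb with h | h
      · exact hne b (List.mem_of_mem_dropLast h)
      · simp at h; subst h; simp

theorem pvMain (hostname : String) : ∀ (lines : List String) (bs : List (List String)),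
    (∀ b ∈ bs, b ≠ []) →
    lines.foldl (pvFexStepA hostname) (pvAbs hostname bs)
      = pvAbs hostname (lines.foldl pvBlockStep bs) := by
  intro lines
  induction lines with
  | nil => intro bs _; rfl
  | cons line rest ih =>
    intro bs hne
    simp only [List.foldl_cons]
    rw [pvStep_comm hostname bs line hne]
    exact ih _ (pvBlockStep_ne bs line hne)

-- ===== VERDICT (by name: the statement is the Claim_ definition above) =====
theorem parse_nexus_fex_detail_py_spec : Claim_equal_parse_nexus_fex_detail_py := by
  intro output hostname _ _
  unfold Spec_parse_nexus_fex_detail_py parse_nexus_fex_detail_py parse_nexus_fex_detail_py_alt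
  have h0 : (([], none) : List (List (String × String)) × Option (PySem.Dict String String))
      = pvAbs hostname [] := rfl
  rw [h0, pvMain hostname _ [] (by intro b hb; cases hb)]
  cases hlast : (((PySem.Str.split? output "\n").getD []).foldl pvBlockStep []).getLast? with
  | none =>
    have hempty : ((PySem.Str.split? output "\n").getD []).foldl pvBlockStep [] = [] := by
      cases h : ((PySem.Str.split? output "\n").getD []).foldl pvBlockStep [] <;> simp_all
    rw [hempty]
    rfl
  | some b =>
    have hbs := pv_dropLast_append_getLast hlast
    have hmap : (((PySem.Str.split? output "\n").getD []).foldl pvBlockStep []).map (pvMkFex hostname)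
        = (((PySem.Str.split? output "\n").getD []).foldl pvBlockStep []).dropLast.map (pvMkFex hostname)
          ++ [pvMkFex hostname b] := by
      conv_lhs => rw [← hbs]
      simp
    unfold pvAbs
    rw [hlast]
    simp only [Option.elim]
    rw [hmap]
    rfl
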